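-- pv_equiv track=rewrite | github.com/huangnengCSU/BlockPolish | rnnt/dataset_ctc_polish.py | generate_flipflop_sequence
-- ===== SOURCE A (Python) =====
-- def generate_flipflop_sequence(value, length):
--     out = []
--     for i in range(length):
--         if i % 2 == 0:
--             out.append(value)
--         else:
--             out.append(value + 1)
--     return out
-- ===== SOURCE B (Python) =====
-- def generate_flipflop_sequence(value, length):
--     return ([value, value + 1] * ((length + 1) // 2))[:length]
-- ===== Notes on version B (the rewrite author's own statement) =====
-- stated objective: faster
-- what changed: Replaces the per-index loop with its i%2 parity branch by replicating the two-element pattern [value, value+1] (length+1)//2 times and truncating to length (measured constant-factor speedup).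
import Mathlib
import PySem

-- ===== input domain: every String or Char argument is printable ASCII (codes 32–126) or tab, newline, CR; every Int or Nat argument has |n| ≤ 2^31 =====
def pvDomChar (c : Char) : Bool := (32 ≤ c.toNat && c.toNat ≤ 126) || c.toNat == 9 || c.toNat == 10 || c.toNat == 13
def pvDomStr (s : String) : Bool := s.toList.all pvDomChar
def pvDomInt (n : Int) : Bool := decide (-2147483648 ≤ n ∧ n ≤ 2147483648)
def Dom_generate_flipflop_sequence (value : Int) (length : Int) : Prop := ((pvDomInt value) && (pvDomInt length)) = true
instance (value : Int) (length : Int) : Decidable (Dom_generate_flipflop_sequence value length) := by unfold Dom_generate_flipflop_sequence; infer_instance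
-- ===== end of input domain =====

-- B builds the alternating list by replicating the two-element pattern and truncating,
-- instead of A's per-index loop with a parity branch (objective: faster, measured constant-factor).

-- ===== PORT A =====
def generate_flipflop_sequence (value : Int) (length : Int) : List Int :=
  (PySem.List.pyRange 0 length 1).foldl
    (fun out i => if PySem.Int.mod i 2 = 0 then out ++ [value] else out ++ [value + 1]) []

-- ===== PORT B =====
def generate_flipflop_sequence_alt (value : Int) (length : Int) : List Int :=
  PySem.List.slice ((List.replicate (PySem.Int.floordiv (length + 1) 2).toNat [value, value + 1]).flatten)
    none (some length)

-- ===== PRECONDITION & SPEC =====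
def Spec_generate_flipflop_sequence (value : Int) (length : Int) (out : List Int) : Prop := out = generate_flipflop_sequence_alt value length
instance (value : Int) (length : Int) (out : List Int) : Decidable (Spec_generate_flipflop_sequence value length out) := by unfold Spec_generate_flipflop_sequence; infer_instance

-- ===== CLAIM (what is proved, stated in full; the proofs are below) =====
def Claim_equal_generate_flipflop_sequence : Prop := ∀ (value : Int) (length : Int), Dom_generate_flipflop_sequence value length → Spec_generate_flipflop_sequence value length (generate_flipflop_sequence value length)

-- ===== LEMMAS AND PROOFS =====

-- the common characterisation: index k gets value if k is even, value+1 otherwise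
def pvFlip (value : Int) (k : Nat) : Int := if k % 2 = 0 then value else value + 1

theorem pvA_eq_map (value : Int) (n : Nat) :
    generate_flipflop_sequence value n = (List.range n).map (pvFlip value) := by
  unfold generate_flipflop_sequence
  rw [PySem.List.pyRange_one]
  simp only [Int.sub_zero, Int.toNat_natCast]
  induction n with
  | zero => simp
  | succ m ih =>
    rw [List.range_succ, List.map_append, List.foldl_append, ih, List.map_append]
    by_cases h : m % 2 = 0 <;>
      simp [pvFlip, h] <;> omega

theorem pvFlatten_replicate (value : Int) (m : Nat) :
    (List.replicate m [value, value + 1]).flatten = (List.range (2 * m)).map (pvFlip value) := by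
  induction m with
  | zero => simp
  | succ k ih =>
    rw [List.replicate_succ', List.flatten_append, ih]
    have h2 : 2 * (k + 1) = (2 * k + 1) + 1 := by ring
    rw [h2, List.range_succ, List.range_succ, List.map_append, List.map_append]
    simp [pvFlip]

theorem pvB_eq_map (value : Int) (n : Nat) :
    generate_flipflop_sequence_alt value n = (List.range n).map (pvFlip value) := by
  unfold generate_flipflop_sequence_alt
  have hfd : (PySem.Int.floordiv ((n : Int) + 1) 2).toNat = (n + 1) / 2 := by
    rw [PySem.Int.floordiv_eq_ediv_of_pos (by norm_num)]
    omega
  rw [hfd, pvFlatten_replicate, PySem.List.slice_to_natCast, ← List.map_take, List.take_range]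
  have : min n (2 * ((n + 1) / 2)) = n := by omega
  rw [this]

-- ===== VERDICT (by name: the statement is the Claim_ definition above) =====
theorem generate_flipflop_sequence_spec : Claim_equal_generate_flipflop_sequence := by
  intro value length _
  unfold Spec_generate_flipflop_sequence
  rcases (by omega : 0 ≤ length ∨ length < 0) with h | h
  · obtain ⟨n, rfl⟩ := Int.eq_ofNat_of_zero_le h
    rw [pvA_eq_map, pvB_eq_map]
  · have hA : generate_flipflop_sequence value length = [] := by
      unfold generate_flipflop_sequence
      rw [PySem.List.pyRange_one_eq_nil (by omega)]
      rfl
    have hfd : (PySem.Int.floordiv (length + 1) 2).toNat = 0 := by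
      rw [PySem.Int.floordiv_eq_ediv_of_pos (by norm_num)]
      omega
    unfold generate_flipflop_sequence_alt
    rw [hfd, hA]
    simp [PySem.List.slice]
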